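-- pv_equiv track=rewrite | github.com/pypi-data/pypi-mirror-395 | packages/Thermostatsupervisor/thermostatsupervisor-1.0.13.tar.gz/thermostatsupervisor-1.0.13/thermostatsupervisor/kumocloudv3.py | _find_zone_indices_by_patterns
-- ===== SOURCE A (Python) =====
-- def _find_zone_indices_by_patterns(zone_name_to_index):
--     """Find main level and basement indices based on naming patterns."""
--     main_level_index = None
--     basement_index = None
--
--     # Check for various naming patterns
--     for zone_name, index in zone_name_to_index.items():
--         zone_name_lower = zone_name.lower()
--
--         # Check for main level patterns
--         if any(
--             pattern in zone_name_lower
--             for pattern in [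
--                 "main",
--                 "level",
--                 "living",
--                 "first floor",
--                 "1st floor",
--             ]
--         ):
--             main_level_index = index
--
--         # Check for basement patterns
--         elif any(
--             pattern in zone_name_lower
--             for pattern in ["basement", "lower", "cellar", "downstairs"]
--         ):
--             basement_index = index
--
--     return main_level_index, basement_index
-- ===== SOURCE B (Python) =====
-- MAIN_PATTERNS = ["main", "level", "living", "first floor", "1st floor"]
-- BASEMENT_PATTERNS = ["basement", "lower", "cellar", "downstairs"]
--
--
-- def _is_main(name):
--     low = name.lower()
--     return any(p in low for p in MAIN_PATTERNS)
--
--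
-- def _is_basement(name):
--     low = name.lower()
--     return (not _is_main(name)) and any(p in low for p in BASEMENT_PATTERNS)
--
--
-- def _find_zone_indices_by_patterns(zone_name_to_index):
--     """Find main level and basement indices based on naming patterns.
--
--     Two independent reverse scans with early exit: the first match seen in
--     reverse order equals the last match of a forward cumulative scan.
--     """
--     items = list(zone_name_to_index.items())
--     main_level_index = None
--     for name, idx in reversed(items):
--         if _is_main(name):
--             main_level_index = idx
--             break
--     basement_index = None
--     for name, idx in reversed(items):
--         if _is_basement(name):
--             basement_index = idx
--             break
--     return main_level_index, basement_index
-- ===== Notes on version B (the rewrite author's own statement) =====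
-- stated objective: alternative
-- what changed: Replaces the single cumulative forward loop over all items with two independent reverse scans that early-exit at the first match (first match in reverse = last match forward), with the elif exclusion made an explicit not-main conjunct in the basement predicate.
import Mathlib
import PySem

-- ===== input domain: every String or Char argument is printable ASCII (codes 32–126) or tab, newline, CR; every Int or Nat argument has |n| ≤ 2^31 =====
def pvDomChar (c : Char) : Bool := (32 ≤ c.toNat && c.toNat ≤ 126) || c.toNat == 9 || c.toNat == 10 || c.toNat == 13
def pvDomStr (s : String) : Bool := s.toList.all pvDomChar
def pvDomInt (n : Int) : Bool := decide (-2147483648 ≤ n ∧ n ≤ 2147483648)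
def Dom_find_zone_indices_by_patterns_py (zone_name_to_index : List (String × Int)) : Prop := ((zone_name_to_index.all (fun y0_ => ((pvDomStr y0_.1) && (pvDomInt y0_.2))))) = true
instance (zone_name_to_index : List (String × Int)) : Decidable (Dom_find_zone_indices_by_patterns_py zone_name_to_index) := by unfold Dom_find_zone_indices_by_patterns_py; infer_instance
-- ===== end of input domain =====

-- B replaces A's single cumulative forward loop by two independent reverse
-- scans with early exit (first match in reverse = last match forward);
-- objective: alternative decomposition, same cost.

def pvMainPatterns : List String := ["main", "level", "living", "first floor", "1st floor"]
def pvBasementPatterns : List String := ["basement", "lower", "cellar", "downstairs"]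

-- ===== PORT A =====
-- single forward fold carrying both accumulators, branches in source order
def find_zone_indices_by_patterns_py (zone_name_to_index : List (String × Int)) : Option Int × Option Int :=
  zone_name_to_index.foldl
    (fun st p =>
      let zone_name_lower := PySem.Str.lower p.1
      if pvMainPatterns.any (fun pat => PySem.Str.isIn pat zone_name_lower) then
        (some p.2, st.2)
      else if pvBasementPatterns.any (fun pat => PySem.Str.isIn pat zone_name_lower) then
        (st.1, some p.2)
      else st)
    (none, none)

-- ===== PORT B =====
def pvIsMain (name : String) : Bool :=
  pvMainPatterns.any (fun pat => PySem.Str.isIn pat (PySem.Str.lower name))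

def pvIsBasement (name : String) : Bool :=
  !pvIsMain name && pvBasementPatterns.any (fun pat => PySem.Str.isIn pat (PySem.Str.lower name))

-- first match with early break, over the reversed item list
def pvFirstMatch (pred : String → Bool) : List (String × Int) → Option Int
  | [] => none
  | (name, idx) :: rest => if pred name then some idx else pvFirstMatch pred rest

def find_zone_indices_by_patterns_py_alt (zone_name_to_index : List (String × Int)) : Option Int × Option Int :=
  (pvFirstMatch pvIsMain zone_name_to_index.reverse,
   pvFirstMatch pvIsBasement zone_name_to_index.reverse)

-- ===== PRECONDITION & SPEC =====
def Spec_find_zone_indices_by_patterns_py (zone_name_to_index : List (String × Int)) (out : Option Int × Option Int) : Prop := out = find_zone_indices_by_patterns_py_alt zone_name_to_index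
instance (zone_name_to_index : List (String × Int)) (out : Option Int × Option Int) : Decidable (Spec_find_zone_indices_by_patterns_py zone_name_to_index out) := by unfold Spec_find_zone_indices_by_patterns_py; infer_instance

-- ===== CLAIM (what is proved, stated in full; the proofs are below) =====
def Claim_equal_find_zone_indices_by_patterns_py : Prop := ∀ (zone_name_to_index : List (String × Int)), Dom_find_zone_indices_by_patterns_py zone_name_to_index → Spec_find_zone_indices_by_patterns_py zone_name_to_index (find_zone_indices_by_patterns_py zone_name_to_index)

-- ===== LEMMAS AND PROOFS =====

theorem pvFirstMatch_append (pred : String → Bool) (xs ys : List (String × Int)) :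
    pvFirstMatch pred (xs ++ ys)
      = ((pvFirstMatch pred xs).rec (pvFirstMatch pred ys) (fun i => some i)) := by
  induction xs with
  | nil => rfl
  | cons x rest ih =>
      obtain ⟨n, i⟩ := x
      by_cases h : pred n = true <;> simp [pvFirstMatch, h, ih]

-- invariant of A's fold: starting from any state st, the fold over l ends in
-- (first main match of l.reverse, else st.1; first basement match of l.reverse, else st.2)
theorem pvFold_inv (l : List (String × Int)) (st : Option Int × Option Int) :
    l.foldl
      (fun st p =>
        let zone_name_lower := PySem.Str.lower p.1
        if pvMainPatterns.any (fun pat => PySem.Str.isIn pat zone_name_lower) then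
          (some p.2, st.2)
        else if pvBasementPatterns.any (fun pat => PySem.Str.isIn pat zone_name_lower) then
          (st.1, some p.2)
        else st)
      st
    = ((pvFirstMatch pvIsMain l.reverse).rec st.1 (fun i => some i),
       (pvFirstMatch pvIsBasement l.reverse).rec st.2 (fun i => some i)) := by
  induction l generalizing st with
  | nil => rfl
  | cons x rest ih =>
      obtain ⟨n, i⟩ := x
      rw [List.foldl_cons, ih]
      rw [List.reverse_cons, pvFirstMatch_append pvIsMain, pvFirstMatch_append pvIsBasement]
      cases hm : pvMainPatterns.any (fun pat => PySem.Str.isIn pat (PySem.Str.lower n)) <;>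
        cases hb : pvBasementPatterns.any (fun pat => PySem.Str.isIn pat (PySem.Str.lower n)) <;>
          simp only [pvFirstMatch, pvIsMain, pvIsBasement, hm, hb, Bool.not_true, Bool.not_false,
            Bool.and_false, Bool.and_true, reduceIte] <;>
            cases hB : pvFirstMatch pvIsBasement rest.reverse <;>
              cases hM : pvFirstMatch pvIsMain rest.reverse <;> rfl

-- ===== VERDICT (by name: the statement is the Claim_ definition above) =====
theorem find_zone_indices_by_patterns_py_spec : Claim_equal_find_zone_indices_by_patterns_py := by
  intro l _
  show _ = _
  rw [find_zone_indices_by_patterns_py, pvFold_inv]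
  cases hM : pvFirstMatch pvIsMain l.reverse <;>
    cases hB : pvFirstMatch pvIsBasement l.reverse <;>
      simp [find_zone_indices_by_patterns_py_alt, hM, hB]
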